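-- pv_equiv track=rewrite | github.com/xImoZA/pysatl-cpd | pysatl_cpd/analysis/results_analyzer.py | count_confusion_matrix
-- ===== SOURCE A (Python) =====
-- def count_confusion_matrix(
--     predicted: list[int], actual: list[int], window: tuple[int, int] | None = None
-- ) -> tuple[int, int, int, int]:
--     """static method for counting confusion matrix for hypothesis of equality of change points on a window
--
--     :param: predicted: first array or list of change points, determined as prediction
--     :param: actual: second array or list of change points, determined as actual
--     :param: window: tuple of two indices (start, stop), determines a window for hypothesis
--
--     :return: tuple of integers (true-positive, true-negative, false-positive, false-negative)
--     """
--     if not predicted and not actual: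
--         raise ValueError("no results and no predictions")
--     if window is None:
--         window = (min(predicted + actual), max(predicted + actual))
--     predicted_set = set(predicted)
--     actual_set = set(actual)
--     tp = tn = fp = fn = 0
--     for i in range(window[0], window[1]):
--         if i in predicted_set:
--             if i in actual_set:
--                 tp += 1
--                 continue
--             fp += 1
--         elif i in actual_set:
--             fn += 1
--             continue
--         tn += 1
--     return tp, tn, fp, fn
-- ===== SOURCE B (Python) =====
-- def count_confusion_matrix(predicted, actual, window=None):
--     if not predicted and not actual:
--         raise ValueError("no results and no predictions")
--     if window is None:
--         window = (min(predicted + actual), max(predicted + actual))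
--     start, stop = window
--     width = max(0, stop - start)
--     actual_in = {x for x in actual if start <= x < stop}
--     predicted_in = {x for x in predicted if start <= x < stop}
--     tp = len(predicted_in & actual_in)
--     fp = len(predicted_in) - tp
--     fn = len(actual_in) - tp
--     tn = width - len(actual_in)  # same accounting as the original: tn counts every index not in actual
--     return tp, tn, fp, fn
-- ===== Notes on version B (the rewrite author's own statement) =====
-- stated objective: faster
-- what changed: Replaces the O(width) scan over every integer index of the window by set intersections/differences of the change-point lists clipped to the window, deriving tn arithmetically from the window width.
import Mathlib
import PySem

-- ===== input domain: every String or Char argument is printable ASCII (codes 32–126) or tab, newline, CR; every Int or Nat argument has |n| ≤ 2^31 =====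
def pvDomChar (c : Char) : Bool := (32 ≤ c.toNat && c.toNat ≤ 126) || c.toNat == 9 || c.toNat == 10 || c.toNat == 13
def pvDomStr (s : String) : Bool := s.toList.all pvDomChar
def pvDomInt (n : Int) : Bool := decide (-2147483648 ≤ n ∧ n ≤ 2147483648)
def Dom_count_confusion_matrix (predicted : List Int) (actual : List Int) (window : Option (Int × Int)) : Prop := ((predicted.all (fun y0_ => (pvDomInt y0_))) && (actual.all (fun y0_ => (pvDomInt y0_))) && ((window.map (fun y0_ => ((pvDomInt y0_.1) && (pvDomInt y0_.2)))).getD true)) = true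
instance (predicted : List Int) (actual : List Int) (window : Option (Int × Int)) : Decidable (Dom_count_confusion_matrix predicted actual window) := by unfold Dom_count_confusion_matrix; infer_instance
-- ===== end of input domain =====

-- B replaces A's scan over every integer index of the window by set operations on the
-- change-point lists clipped to the window, deriving tn arithmetically from the window width.

-- ===== PORT A =====
def count_confusion_matrix (predicted : List Int) (actual : List Int) (window : Option (Int × Int)) : Int × Int × Int × Int :=
  if predicted = [] ∧ actual = [] then (0, 0, 0, 0)  -- Python raises ValueError here; excluded by Pre_
  else
    let w : Int × Int := match window with
      | none => ((PySem.List.min? (predicted ++ actual) (fun x => x)).getD 0,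
                 (PySem.List.max? (predicted ++ actual) (fun x => x)).getD 0)
      | some w => w
    let predictedSet : PySem.Set Int := PySem.Set.ofList predicted
    let actualSet : PySem.Set Int := PySem.Set.ofList actual
    (PySem.List.pyRange w.1 w.2 1).foldl
      (fun (s : Int × Int × Int × Int) i =>
        let (tp, tn, fp, fn) := s
        if PySem.Set.contains predictedSet i then
          if PySem.Set.contains actualSet i then (tp + 1, tn, fp, fn)
          else (tp, tn + 1, fp + 1, fn)
        else if PySem.Set.contains actualSet i then (tp, tn, fp, fn + 1)
        else (tp, tn + 1, fp, fn))
      (0, 0, 0, 0)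

-- ===== PORT B =====
def count_confusion_matrix_alt (predicted : List Int) (actual : List Int) (window : Option (Int × Int)) : Int × Int × Int × Int :=
  if predicted = [] ∧ actual = [] then (0, 0, 0, 0)  -- Python raises ValueError here; excluded by Pre_
  else
    let w : Int × Int := match window with
      | none => ((PySem.List.min? (predicted ++ actual) (fun x => x)).getD 0,
                 (PySem.List.max? (predicted ++ actual) (fun x => x)).getD 0)
      | some w => w
    let start := w.1
    let stop := w.2
    let width : Int := max 0 (stop - start)
    let actualIn : PySem.Set Int := PySem.Set.ofList (actual.filter (fun x => start ≤ x && x < stop))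
    let predictedIn : PySem.Set Int := PySem.Set.ofList (predicted.filter (fun x => start ≤ x && x < stop))
    let tp : Int := PySem.Set.len (PySem.Set.inter predictedIn actualIn)
    let fp : Int := PySem.Set.len predictedIn - tp
    let fn : Int := PySem.Set.len actualIn - tp
    let tn : Int := width - PySem.Set.len actualIn
    (tp, tn, fp, fn)

-- ===== PRECONDITION & SPEC =====
-- Pre_ excludes only the input on which Python's A raises ValueError (both lists empty).
def Pre_count_confusion_matrix (predicted : List Int) (actual : List Int) (window : Option (Int × Int)) : Prop :=
  ¬ (predicted = [] ∧ actual = [])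
instance (predicted : List Int) (actual : List Int) (window : Option (Int × Int)) : Decidable (Pre_count_confusion_matrix predicted actual window) := by unfold Pre_count_confusion_matrix; infer_instance
def pvWitness_count_confusion_matrix : List Int × List Int × (Option (Int × Int)) := ([1, 4], [1, 3], some (0, 5))

def Spec_count_confusion_matrix (predicted : List Int) (actual : List Int) (window : Option (Int × Int)) (out : Int × Int × Int × Int) : Prop := out = count_confusion_matrix_alt predicted actual window
instance (predicted : List Int) (actual : List Int) (window : Option (Int × Int)) (out : Int × Int × Int × Int) : Decidable (Spec_count_confusion_matrix predicted actual window out) := by unfold Spec_count_confusion_matrix; infer_instance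

-- ===== CLAIM (what is proved, stated in full; the proofs are below) =====
def Claim_equal_count_confusion_matrix : Prop := ∀ (predicted : List Int) (actual : List Int) (window : Option (Int × Int)), Dom_count_confusion_matrix predicted actual window → Pre_count_confusion_matrix predicted actual window → Spec_count_confusion_matrix predicted actual window (count_confusion_matrix predicted actual window)

-- ===== LEMMAS AND PROOFS =====

-- two nodup lists with the same members have the same length
theorem pv_len_eq_of_mem_iff {l1 l2 : List Int} (h1 : l1.Nodup) (h2 : l2.Nodup)
    (h : ∀ x, x ∈ l1 ↔ x ∈ l2) : l1.length = l2.length :=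
  ((List.perm_ext_iff_of_nodup h1 h2).2 h).length_eq

theorem pv_countP_add_countP_not {α : Type} (l : List α) (p : α → Bool) :
    l.countP p + l.countP (fun x => !p x) = l.length := by
  induction l with
  | nil => simp
  | cons a t ih => by_cases h : p a = true <;> simp [List.countP_cons, h] <;> omega

theorem pv_countP_split {α : Type} (l : List α) (p q : α → Bool) :
    l.countP p = l.countP (fun x => p x && q x) + l.countP (fun x => p x && !q x) := by
  induction l with
  | nil => simp
  | cons a t ih =>
    by_cases hp : p a = true <;> by_cases hq : q a = true <;>
      simp [List.countP_cons, hp, hq, ih] <;> omega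

-- A's loop from an arbitrary state is four independent counts
theorem pv_loop_eq (ps as : PySem.Set Int) (R : List Int) :
    ∀ (tp tn fp fn : Int),
      R.foldl
        (fun (s : Int × Int × Int × Int) i =>
          let (tp, tn, fp, fn) := s
          if PySem.Set.contains ps i then
            if PySem.Set.contains as i then (tp + 1, tn, fp, fn)
            else (tp, tn + 1, fp + 1, fn)
          else if PySem.Set.contains as i then (tp, tn, fp, fn + 1)
          else (tp, tn + 1, fp, fn))
        (tp, tn, fp, fn)
      = (tp + R.countP (fun i => PySem.Set.contains ps i && PySem.Set.contains as i),
         tn + R.countP (fun i => !PySem.Set.contains as i),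
         fp + R.countP (fun i => PySem.Set.contains ps i && !PySem.Set.contains as i),
         fn + R.countP (fun i => !PySem.Set.contains ps i && PySem.Set.contains as i)) := by
  induction R with
  | nil => intro tp tn fp fn; simp
  | cons i t ih =>
    intro tp tn fp fn
    rw [List.foldl_cons]
    cases hp : PySem.Set.contains ps i <;> cases ha : PySem.Set.contains as i <;>
      simp only [hp, ha, Bool.false_and, Bool.true_and, Bool.and_false, Bool.and_true,
        Bool.not_false, Bool.not_true, Bool.false_eq_true, if_false, if_true,
        List.countP_cons, ite_true, ite_false, cond_true, cond_false, decide_true,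
        decide_false, ih, List.countP_cons] <;>
      simp only [Prod.mk.injEq] <;> refine ⟨?_, ?_, ?_, ?_⟩ <;> push_cast <;> ring

-- a membership count over the range equals the size of the clipped set
theorem pv_count_range (a b : Int) (p : Int → Bool) (S : List Int)
    (hmem : ∀ x, p x = true ↔ x ∈ S) :
    (PySem.List.pyRange a b 1).countP p
      = (PySem.Set.ofList (S.filter (fun x => a ≤ x && x < b))).length := by
  rw [List.countP_eq_length_filter]
  apply pv_len_eq_of_mem_iff
  · exact (PySem.List.nodup_pyRange_one a b).filter _
  · exact PySem.Set.nodup_ofList _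
  · intro x
    simp [List.mem_filter, PySem.List.mem_pyRange_one, PySem.Set.mem_ofList, hmem]
    tauto

-- tp: intersection membership count
theorem pv_count_inter (a b : Int) (P A : List Int) :
    (PySem.List.pyRange a b 1).countP
        (fun i => PySem.Set.contains (PySem.Set.ofList P) i && PySem.Set.contains (PySem.Set.ofList A) i)
      = (PySem.Set.inter (PySem.Set.ofList (P.filter (fun x => a ≤ x && x < b)))
          (PySem.Set.ofList (A.filter (fun x => a ≤ x && x < b)))).length := by
  rw [List.countP_eq_length_filter]
  apply pv_len_eq_of_mem_iff
  · exact (PySem.List.nodup_pyRange_one a b).filter _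
  · exact PySem.Set.nodup_inter _ _ (PySem.Set.nodup_ofList _)
  · intro x
    simp [List.mem_filter, PySem.List.mem_pyRange_one, PySem.Set.mem_inter, PySem.Set.mem_ofList]
    tauto

-- the main equality for an explicit window (a, b)
theorem pv_main (P A : List Int) (a b : Int) :
    (PySem.List.pyRange a b 1).foldl
      (fun (s : Int × Int × Int × Int) i =>
        let (tp, tn, fp, fn) := s
        if PySem.Set.contains (PySem.Set.ofList P) i then
          if PySem.Set.contains (PySem.Set.ofList A) i then (tp + 1, tn, fp, fn)
          else (tp, tn + 1, fp + 1, fn)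
        else if PySem.Set.contains (PySem.Set.ofList A) i then (tp, tn, fp, fn + 1)
        else (tp, tn + 1, fp, fn))
      (0, 0, 0, 0)
    = (PySem.Set.len (PySem.Set.inter (PySem.Set.ofList (P.filter (fun x => a ≤ x && x < b)))
          (PySem.Set.ofList (A.filter (fun x => a ≤ x && x < b)))),
       max 0 (b - a) - PySem.Set.len (PySem.Set.ofList (A.filter (fun x => a ≤ x && x < b))),
       PySem.Set.len (PySem.Set.ofList (P.filter (fun x => a ≤ x && x < b)))
         - PySem.Set.len (PySem.Set.inter (PySem.Set.ofList (P.filter (fun x => a ≤ x && x < b)))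
             (PySem.Set.ofList (A.filter (fun x => a ≤ x && x < b)))),
       PySem.Set.len (PySem.Set.ofList (A.filter (fun x => a ≤ x && x < b)))
         - PySem.Set.len (PySem.Set.inter (PySem.Set.ofList (P.filter (fun x => a ≤ x && x < b)))
             (PySem.Set.ofList (A.filter (fun x => a ≤ x && x < b))))) := by
  rw [pv_loop_eq]
  have hPmem : ∀ x, PySem.Set.contains (PySem.Set.ofList P) x = true ↔ x ∈ P := by
    intro x; rw [PySem.Set.contains_iff, PySem.Set.mem_ofList]
  have hAmem : ∀ x, PySem.Set.contains (PySem.Set.ofList A) x = true ↔ x ∈ A := by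
    intro x; rw [PySem.Set.contains_iff, PySem.Set.mem_ofList]
  have hlenA := pv_count_range a b (fun i => PySem.Set.contains (PySem.Set.ofList A) i) A hAmem
  have hlenP := pv_count_range a b (fun i => PySem.Set.contains (PySem.Set.ofList P) i) P hPmem
  have htp := pv_count_inter a b P A
  have hRlen : (PySem.List.pyRange a b 1).length = (b - a).toNat := PySem.List.length_pyRange_one a b
  have htn := pv_countP_add_countP_not (PySem.List.pyRange a b 1)
    (fun i => PySem.Set.contains (PySem.Set.ofList A) i)
  have hfp := pv_countP_split (PySem.List.pyRange a b 1)
    (fun i => PySem.Set.contains (PySem.Set.ofList P) i)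
    (fun i => PySem.Set.contains (PySem.Set.ofList A) i)
  have hfn0 := pv_countP_split (PySem.List.pyRange a b 1)
    (fun i => PySem.Set.contains (PySem.Set.ofList A) i)
    (fun i => PySem.Set.contains (PySem.Set.ofList P) i)
  have hc1 : (PySem.List.pyRange a b 1).countP
        (fun i => PySem.Set.contains (PySem.Set.ofList A) i && PySem.Set.contains (PySem.Set.ofList P) i)
      = (PySem.List.pyRange a b 1).countP
        (fun i => PySem.Set.contains (PySem.Set.ofList P) i && PySem.Set.contains (PySem.Set.ofList A) i) := by
    apply List.countP_congr; intro x _; rw [Bool.and_comm]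
  have hc2 : (PySem.List.pyRange a b 1).countP
        (fun i => PySem.Set.contains (PySem.Set.ofList A) i && !PySem.Set.contains (PySem.Set.ofList P) i)
      = (PySem.List.pyRange a b 1).countP
        (fun i => !PySem.Set.contains (PySem.Set.ofList P) i && PySem.Set.contains (PySem.Set.ofList A) i) := by
    apply List.countP_congr; intro x _; rw [Bool.and_comm]
  rw [hc1, hc2] at hfn0
  simp only [PySem.Set.len, Prod.mk.injEq]
  refine ⟨?_, ?_, ?_, ?_⟩ <;> omega

-- ===== VERDICT (by name: the statement is the Claim_ definition above) =====
theorem count_confusion_matrix_spec : Claim_equal_count_confusion_matrix := by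
  intro predicted actual window _ hpre
  unfold Spec_count_confusion_matrix count_confusion_matrix count_confusion_matrix_alt
  rw [if_neg hpre, if_neg hpre]
  cases window with
  | none => exact pv_main predicted actual _ _
  | some w => exact pv_main predicted actual w.1 w.2
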